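-- pv_equiv track=rewrite | github.com/drnelson6/aps-diglib-migration-scripts | clean-diglib-batches.py | add_subjects
-- ===== SOURCE A (Python) =====
-- def add_subjects(subject, cell):
--     new_cell = []
--     if cell != '':
--         cells = cell.split('|')
--         for i in cells:
--             new_data = f'{subject}:{i}'
--             new_cell.append(new_data)
--     return '|'.join(new_cell)
-- ===== SOURCE B (Python) =====
-- def add_subjects(subject, cell):
--     if cell == '':
--         return ''
--     return f'{subject}:' + cell.replace('|', f'|{subject}:')
-- ===== Notes on version B (the rewrite author's own statement) =====
-- stated objective: idiomatic
-- what changed: Replaces the split/loop/append/join pipeline with a single string replace that inserts the prefix after every pipe (plus the leading prefix), keeping only the empty-cell guard.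
import Mathlib
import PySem

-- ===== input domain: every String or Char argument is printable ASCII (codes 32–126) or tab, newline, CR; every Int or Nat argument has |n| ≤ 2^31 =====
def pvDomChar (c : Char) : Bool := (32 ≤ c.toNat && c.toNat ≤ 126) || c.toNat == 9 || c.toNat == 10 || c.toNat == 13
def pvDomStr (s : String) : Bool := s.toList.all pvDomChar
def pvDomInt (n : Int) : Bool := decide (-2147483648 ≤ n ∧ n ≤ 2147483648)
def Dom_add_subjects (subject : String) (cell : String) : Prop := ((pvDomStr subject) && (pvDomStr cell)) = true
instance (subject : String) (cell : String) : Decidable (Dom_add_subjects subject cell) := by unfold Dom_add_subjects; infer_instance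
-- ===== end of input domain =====

-- B replaces A's split/loop/join pipeline with a single string replace (idiomatic, same cost).

-- ===== PORT A =====
def add_subjects (subject : String) (cell : String) : String :=
  let new_cell : List String := []
  let new_cell :=
    if cell ≠ "" then
      let cells := (PySem.Str.split? cell "|").getD []   -- sep is the literal "|" ≠ "", so split? is some
      cells.foldl (fun acc i => acc ++ [subject ++ ":" ++ i]) new_cell
    else new_cell
  PySem.Str.join "|" new_cell

-- ===== PORT B =====
def add_subjects_alt (subject : String) (cell : String) : String :=
  if cell = "" then ""
  else (subject ++ ":") ++ PySem.Str.replace cell "|" ("|" ++ subject ++ ":")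

-- ===== PRECONDITION & SPEC =====
def Spec_add_subjects (subject : String) (cell : String) (out : String) : Prop := out = add_subjects_alt subject cell
instance (subject : String) (cell : String) (out : String) : Decidable (Spec_add_subjects subject cell out) := by unfold Spec_add_subjects; infer_instance

-- ===== CLAIM (what is proved, stated in full; the proofs are below) =====
def Claim_equal_add_subjects : Prop := ∀ (subject : String) (cell : String), Dom_add_subjects subject cell → Spec_add_subjects subject cell (add_subjects subject cell)

-- ===== LEMMAS AND PROOFS =====

-- simple fuel-free spec of splitting at '|'
def pvSplit : List Char → List (List Char)
  | [] => [[]]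
  | c :: t => if c = '|' then [] :: pvSplit t else (pvSplit t).modifyHead (c :: ·)

-- simple fuel-free spec of replacing '|' by `new`
def pvRepl (new : List Char) : List Char → List Char
  | [] => []
  | c :: t => if c = '|' then new ++ pvRepl new t else c :: pvRepl new t

theorem pvSplit_ne_nil (l : List Char) : pvSplit l ≠ [] := by
  cases l with
  | nil => simp [pvSplit]
  | cons c t =>
      simp only [pvSplit]
      split_ifs
      · simp
      · intro h
        have := congrArg List.length h
        simp at this
        exact pvSplit_ne_nil t this

theorem splitOn_go_eq (fuel : Nat) :
    ∀ (l cur : List Char) (acc : List (List Char)), l.length < fuel →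
      PySem.Chars.splitOn.go ['|'] fuel l cur acc
        = acc.reverse ++ (pvSplit l).modifyHead (cur.reverse ++ ·) := by
  induction fuel with
  | zero => intro l cur acc h; omega
  | succ n ih =>
      intro l cur acc h
      cases l with
      | nil => simp [PySem.Chars.splitOn.go, pvSplit]
      | cons c rest =>
          rw [show PySem.Chars.splitOn.go ['|'] (n+1) (c :: rest) cur acc
              = if List.isPrefixOf ['|'] (c :: rest) = true then
                  PySem.Chars.splitOn.go ['|'] n rest [] (cur.reverse :: acc)
                else PySem.Chars.splitOn.go ['|'] n rest (c :: cur) acc from rfl]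
          have hlen : rest.length < n := by simpa using h
          by_cases hc : c = '|'
          · subst hc
            rw [if_pos (by simp [List.isPrefixOf])]
            rw [ih rest [] (cur.reverse :: acc) hlen]
            simp [pvSplit]
            cases pvSplit rest <;> simp
          · rw [if_neg (by simp [List.isPrefixOf]; intro h'; exact absurd h'.symm hc)]
            rw [ih rest (c :: cur) acc hlen]
            simp [pvSplit, if_neg hc, List.modifyHead_modifyHead]
            rfl

theorem replace_go_eq (new : List Char) (fuel : Nat) :
    ∀ (l acc : List Char), l.length ≤ fuel →
      PySem.Chars.replace.go ['|'] new fuel l acc = acc.reverse ++ pvRepl new l := by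
  induction fuel with
  | zero =>
      intro l acc h
      have : l = [] := by cases l <;> simp_all
      subst this
      simp [PySem.Chars.replace.go, pvRepl]
  | succ n ih =>
      intro l acc h
      cases l with
      | nil => simp [PySem.Chars.replace.go, pvRepl]
      | cons c rest =>
          rw [show PySem.Chars.replace.go ['|'] new (n+1) (c :: rest) acc
              = if List.isPrefixOf ['|'] (c :: rest) = true then
                  PySem.Chars.replace.go ['|'] new n rest (new.reverse ++ acc)
                else PySem.Chars.replace.go ['|'] new n rest (c :: acc) from rfl]
          have hlen : rest.length ≤ n := by simpa using h
          by_cases hc : c = '|'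
          · subst hc
            rw [if_pos (by simp [List.isPrefixOf])]
            rw [ih rest (new.reverse ++ acc) hlen]
            simp [pvRepl]
          · rw [if_neg (by simp [List.isPrefixOf]; intro h'; exact absurd h'.symm hc)]
            rw [ih rest (c :: acc) hlen]
            simp [pvRepl, if_neg hc]

theorem join_cons_head (new y : List Char) (rest : List (List Char)) (c : Char) :
    PySem.Chars.join new ((c :: y) :: rest) = c :: PySem.Chars.join new (y :: rest) := by
  cases rest with
  | nil => simp [PySem.Chars.join, List.intercalate, List.intersperse]
  | cons z zs => rw [PySem.Chars.join_cons_cons, PySem.Chars.join_cons_cons]; simp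

theorem join_pvSplit (new : List Char) (l : List Char) :
    PySem.Chars.join new (pvSplit l) = pvRepl new l := by
  induction l with
  | nil => simp [pvSplit, pvRepl, PySem.Chars.join, List.intercalate]
  | cons c t ih =>
      simp only [pvSplit, pvRepl]
      by_cases hc : c = '|'
      · subst hc
        rw [if_pos rfl, if_pos rfl]
        cases hsp : pvSplit t with
        | nil => exact absurd hsp (pvSplit_ne_nil t)
        | cons y ys =>
            rw [PySem.Chars.join_cons_cons]
            rw [hsp] at ih
            simp [ih]
      · rw [if_neg hc, if_neg hc]
        cases hsp : pvSplit t with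
        | nil => exact absurd hsp (pvSplit_ne_nil t)
        | cons y ys =>
            rw [hsp] at ih
            simp only [List.modifyHead]
            rw [join_cons_head, ih]

theorem join_map_prefix (p : List Char) (parts : List (List Char)) (h : parts ≠ []) :
    PySem.Chars.join ['|'] (parts.map (p ++ ·)) = p ++ PySem.Chars.join ('|' :: p) parts := by
  induction parts with
  | nil => exact absurd rfl h
  | cons x rest ih =>
      cases rest with
      | nil => simp [PySem.Chars.join, List.intercalate, List.intersperse]
      | cons y ys =>
          simp only [List.map_cons]
          rw [PySem.Chars.join_cons_cons, PySem.Chars.join_cons_cons]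
          rw [show (p ++ y) :: ys.map (p ++ ·) = ((y :: ys).map (p ++ ·)) by simp]
          rw [ih (by simp)]
          simp

theorem foldl_append_map {α β : Type} (f : α → β) (xs : List α) :
    ∀ acc : List β, xs.foldl (fun acc i => acc ++ [f i]) acc = acc ++ xs.map f := by
  induction xs with
  | nil => intro acc; simp
  | cons x t ih => intro acc; simp [ih]

theorem splitOn_pipe (cs : List Char) : PySem.Chars.splitOn cs ['|'] = pvSplit cs := by
  unfold PySem.Chars.splitOn
  rw [splitOn_go_eq (cs.length + 1) cs [] [] (by omega)]
  simp
  cases hsp : pvSplit cs with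
  | nil => exact absurd hsp (pvSplit_ne_nil cs)
  | cons y ys => simp [List.modifyHead]

theorem replace_pipe (cs new : List Char) :
    PySem.Chars.replace cs ['|'] new = pvRepl new cs := by
  unfold PySem.Chars.replace
  rw [if_neg (by simp)]
  rw [replace_go_eq new cs.length cs [] le_rfl]
  simp

-- ===== VERDICT (by name: the statement is the Claim_ definition above) =====
theorem add_subjects_spec : Claim_equal_add_subjects := by
  intro subject cell _
  unfold Spec_add_subjects
  simp only [add_subjects, add_subjects_alt, ne_eq]
  by_cases hc : cell = ""
  · subst hc
    simp [PySem.Str.join, PySem.Chars.join, List.intercalate]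
  · rw [if_pos hc, if_neg hc]
    apply String.toList_injective
    have hsplit : PySem.Str.split? cell "|" =
        some ((pvSplit cell.toList).map String.ofList) := by
      unfold PySem.Str.split? PySem.Chars.split?
      rw [if_neg (by simp [show ("|" : String).toList = ['|'] from rfl])]
      simp [show ("|" : String).toList = ['|'] from rfl, splitOn_pipe]
    rw [hsplit, Option.getD_some, foldl_append_map, List.nil_append,
        PySem.Str.toList_join, List.map_map]
    have hmap : (List.map (String.toList ∘ HAppend.hAppend (subject ++ ":"))
          (List.map String.ofList (pvSplit cell.toList)))
        = (pvSplit cell.toList).map (fun x => (subject.toList ++ [':']) ++ x) := by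
      rw [List.map_map]
      apply List.map_congr_left
      intro x _
      simp [Function.comp, show (":" : String).toList = [':'] from rfl]
    rw [hmap]
    have key := join_map_prefix (subject.toList ++ [':']) (pvSplit cell.toList)
        (pvSplit_ne_nil cell.toList)
    rw [show ("|" : String).toList = ['|'] from rfl, key, join_pvSplit]
    simp [PySem.Str.toList_replace, replace_pipe,
      show ("|" : String).toList = ['|'] from rfl,
      show (":" : String).toList = [':'] from rfl]
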